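-- pv_equiv track=rewrite | github.com/flsing/ITI1120 | lab8/lab8-solutions/magic-solved.py | has_1_to_n_square_v2
-- ===== SOURCE A (Python) =====
-- def has_1_to_n_square_v2(m):
--      '''(2D list)->bool
--      Returns True if the given matrix has elements 1, 2, ..., n^2
--      Precondition: m is n x n squre matrix of numbers, where n>=2
--      '''
--      tmp=[]
--      for row in m:
--           for item in row:
--                tmp.append(item)
--
--      # This solution basically runs in O(n^2 log n), or equally O(M log M) time
--      # where M is the number of elements in the matrix m
--      tmp.sort() # provided that this .sort funtion guarantees N log N time to sort the list of N elements.
--                 # it is unclear if it does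
--      for i in range(len(tmp)):
--           if tmp[i]!=i+1:
--                return False
--      return True
-- ===== SOURCE B (Python) =====
-- def has_1_to_n_square_v2(m):
--      '''(2D list)->bool
--      Single pass: mark presence in a size-M bitmap; reject out-of-range
--      values and duplicates immediately. O(M) instead of O(M log M).
--      '''
--      M = 0
--      for row in m:
--           M += len(row)
--      seen = [False] * M
--      for row in m:
--           for item in row:
--                if item < 1 or item > M or seen[item - 1]:
--                     return False
--                seen[item - 1] = True
--      return True
-- ===== Notes on version B (the rewrite author's own statement) =====
-- stated objective: faster
-- what changed: Instead of flattening, sorting, and comparing position i to i+1, B makes one pass over the matrix marking each value in a size-M boolean array and rejects out-of-range values and duplicates on the spot (no sort).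
import Mathlib
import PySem

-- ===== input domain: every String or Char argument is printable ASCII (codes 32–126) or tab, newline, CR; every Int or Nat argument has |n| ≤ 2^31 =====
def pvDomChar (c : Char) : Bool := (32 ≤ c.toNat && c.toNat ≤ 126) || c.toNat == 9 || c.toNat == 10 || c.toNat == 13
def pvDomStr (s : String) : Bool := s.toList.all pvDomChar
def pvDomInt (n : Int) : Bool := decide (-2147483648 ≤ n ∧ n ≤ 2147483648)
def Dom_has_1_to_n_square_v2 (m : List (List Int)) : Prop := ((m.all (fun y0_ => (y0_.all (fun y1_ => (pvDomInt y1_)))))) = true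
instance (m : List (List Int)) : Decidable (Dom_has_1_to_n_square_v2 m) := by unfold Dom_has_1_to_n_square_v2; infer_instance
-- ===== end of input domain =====

-- B replaces A's flatten-sort-and-compare (O(M log M)) by a single pass that marks each
-- value in a size-M boolean array, rejecting out-of-range values and duplicates on the spot (O(M)).

-- ===== PORT A =====
def has_1_to_n_square_v2 (m : List (List Int)) : Bool :=
  -- tmp = []; for row in m: for item in row: tmp.append(item)
  let tmp := m.foldl (fun acc row => row.foldl (fun acc2 item => acc2 ++ [item]) acc) []
  -- tmp.sort()
  let tmp2 := PySem.List.sorted tmp (fun x => x) false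
  -- for i in range(len(tmp)): if tmp[i] != i+1: return False;  return True
  (PySem.List.pyRange 0 (tmp2.length : Int) 1).all (fun i => PySem.List.pyGetD tmp2 i 0 == i + 1)

-- ===== PORT B =====
-- inner loop of B: 'for item in row: if item < 1 or item > M or seen[item-1]: return False; seen[item-1] = True'
def pvMarkRow (M : Int) : List Int → List Bool → Option (List Bool)
  | [], seen => some seen
  | item :: rest, seen =>
    if item < 1 ∨ M < item then none
    else if seen.getD (item - 1).toNat false then none
    else pvMarkRow M rest (seen.set (item - 1).toNat true)

-- outer loop of B over the rows ('return False' propagates as none)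
def pvMarkRows (M : Int) : List (List Int) → List Bool → Option (List Bool)
  | [], seen => some seen
  | row :: rows, seen =>
    match pvMarkRow M row seen with
    | none => none
    | some seen' => pvMarkRows M rows seen'

def has_1_to_n_square_v2_alt (m : List (List Int)) : Bool :=
  -- M = 0; for row in m: M += len(row)
  let M : Int := m.foldl (fun acc row => acc + (row.length : Int)) 0
  -- seen = [False] * M; nested marking loops; return True iff no early return
  (pvMarkRows M m (List.replicate M.toNat false)).isSome

-- ===== PRECONDITION & SPEC =====
def Spec_has_1_to_n_square_v2 (m : List (List Int)) (out : Bool) : Prop := out = has_1_to_n_square_v2_alt m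
instance (m : List (List Int)) (out : Bool) : Decidable (Spec_has_1_to_n_square_v2 m out) := by unfold Spec_has_1_to_n_square_v2; infer_instance

-- ===== CLAIM (what is proved, stated in full; the proofs are below) =====
def Claim_equal_has_1_to_n_square_v2 : Prop := ∀ (m : List (List Int)), Dom_has_1_to_n_square_v2 m → Spec_has_1_to_n_square_v2 m (has_1_to_n_square_v2 m)

-- ===== LEMMAS AND PROOFS =====

-- the list [1, 2, ..., M], the common reference point of both characterisations
def pvTarget (M : Nat) : List Int := PySem.List.pyRange 1 ((M : Int) + 1) 1

lemma pvTarget_length (M : Nat) : (pvTarget M).length = M := by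
  rw [pvTarget, PySem.List.length_pyRange_one]; omega

lemma pvTarget_mem (M : Nat) (x : Int) : x ∈ pvTarget M ↔ 1 ≤ x ∧ x ≤ (M : Int) := by
  rw [pvTarget, PySem.List.mem_pyRange_one]; omega

lemma pvTarget_nodup (M : Nat) : (pvTarget M).Nodup := PySem.List.nodup_pyRange_one ..

lemma pvTarget_pairwise (M : Nat) : (pvTarget M).Pairwise (· < ·) :=
  PySem.List.pairwise_lt_pyRange_one ..

lemma pvTarget_getElem (M : Nat) (k : Nat) (h : k < (pvTarget M).length) :
    (pvTarget M)[k] = 1 + k := PySem.List.getElem_pyRange_one ..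

-- getD facts for the boolean bitmap
lemma pvGetD_set_self (seen : List Bool) (i : Nat) (h : i < seen.length) :
    (seen.set i true).getD i false = true := by
  simp [List.getD_eq_getElem?_getD, h]

lemma pvGetD_set_ne (seen : List Bool) (i j : Nat) (b : Bool) (h : i ≠ j) :
    (seen.set i b).getD j false = seen.getD j false := by
  simp [List.getD_eq_getElem?_getD, List.getElem?_set_ne h]

lemma pvGetD_replicate (M j : Nat) : (List.replicate M false).getD j false = false := by
  rw [List.getD_eq_getElem?_getD, List.getElem?_replicate]
  split <;> rfl

-- A's tmp-building foldl is flatten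
lemma pvFlatten_foldl (m : List (List Int)) :
    ∀ acc, m.foldl (fun acc row => row.foldl (fun acc2 item => acc2 ++ [item]) acc) acc
      = acc ++ m.flatten := by
  induction m with
  | nil => simp
  | cons r rs ih =>
    intro acc
    rw [List.foldl_cons, PySem.List.foldl_append_singleton_eq_self, ih, List.flatten_cons,
      List.append_assoc]

-- B's length-summing foldl is the length of the flatten
lemma pvLen_foldl (m : List (List Int)) :
    ∀ acc : Int, m.foldl (fun acc row => acc + (row.length : Int)) acc
      = acc + (m.flatten.length : Int) := by
  induction m with
  | nil => simp
  | cons r rs ih =>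
    intro acc
    simp only [List.foldl_cons, ih, List.flatten_cons, List.length_append]
    push_cast; ring

-- A's final check is list equality with pvTarget
lemma pvChk_iff (tmp : List Int) :
    ((PySem.List.pyRange 0 (tmp.length : Int) 1).all
        (fun i => PySem.List.pyGetD tmp i 0 == i + 1) = true)
      ↔ tmp = pvTarget tmp.length := by
  rw [PySem.List.pyRange_one]
  simp only [List.all_eq_true, List.mem_map, List.mem_range, Int.sub_zero, Int.toNat_natCast,
    zero_add, beq_iff_eq, forall_exists_index, and_imp]
  constructor
  · intro h
    refine List.ext_getElem (pvTarget_length tmp.length).symm ?_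
    intro k hk hk'
    have hh := h ((k : Nat) : Int) k hk rfl
    rw [PySem.List.pyGetD_natCast, List.getD_eq_getElem?_getD, List.getElem?_eq_getElem hk,
      Option.getD_some] at hh
    rw [pvTarget_getElem _ _ hk']
    omega
  · intro he
    rintro x k hk rfl
    have hk' : k < (pvTarget tmp.length).length := by rw [pvTarget_length]; exact hk
    rw [PySem.List.pyGetD_natCast, List.getD_eq_getElem?_getD]
    conv_lhs => rw [he]
    rw [List.getElem?_eq_getElem hk', Option.getD_some, pvTarget_getElem _ _ hk']
    omega

-- A = true iff the flattened matrix is a permutation of [1..M]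
lemma pvA_iff (m : List (List Int)) :
    has_1_to_n_square_v2 m = true ↔ m.flatten.Perm (pvTarget m.flatten.length) := by
  show ((PySem.List.pyRange 0
      ((PySem.List.sorted (m.foldl (fun acc row => row.foldl (fun acc2 item => acc2 ++ [item]) acc) [])
        (fun x => x) false).length : Int) 1).all
    (fun i => PySem.List.pyGetD
      (PySem.List.sorted (m.foldl (fun acc row => row.foldl (fun acc2 item => acc2 ++ [item]) acc) [])
        (fun x => x) false) i 0 == i + 1)) = true ↔ _
  rw [pvFlatten_foldl m [], List.nil_append, pvChk_iff, PySem.List.length_sorted]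
  constructor
  · intro h
    have hp := (PySem.List.sorted_perm m.flatten (fun x => x) false).symm
    rw [h] at hp
    exact hp
  · intro h
    exact PySem.List.sorted_eq_of_perm_of_pairwise_lt _ _ _ h.symm (by simpa using pvTarget_pairwise m.flatten.length)

-- marking a flat list succeeds iff every value is in range, distinct, and not yet seen
lemma pvMarkRow_spec (M : Nat) : ∀ (xs : List Int) (seen : List Bool), seen.length = M →
    ((pvMarkRow (M : Int) xs seen).isSome = true ↔
      ((∀ x ∈ xs, 1 ≤ x ∧ x ≤ (M : Int)) ∧ xs.Nodup ∧
        ∀ x ∈ xs, seen.getD (x - 1).toNat false = false)) := by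
  intro xs
  induction xs with
  | nil => intro seen h; simp [pvMarkRow]
  | cons item rest ih =>
    intro seen hlen
    simp only [pvMarkRow]
    by_cases hb : item < 1 ∨ (M : Int) < item
    · rw [if_pos hb]
      refine iff_of_false (by simp) ?_
      rintro ⟨hbd, -, -⟩
      have := hbd item (List.mem_cons_self ..)
      omega
    · rw [if_neg hb]
      push Not at hb
      obtain ⟨h1, h2⟩ := hb
      have hidx : (item - 1).toNat < seen.length := by rw [hlen]; omega
      by_cases hs : seen.getD (item - 1).toNat false = true
      · rw [if_pos hs]
        refine iff_of_false (by simp) ?_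
        rintro ⟨-, -, hseen⟩
        have := hseen item (List.mem_cons_self ..)
        rw [this] at hs
        exact Bool.false_ne_true hs
      · have hs' : seen.getD (item - 1).toNat false = false := by simpa using hs
        rw [if_neg (by rw [hs']; exact Bool.false_ne_true)]
        rw [ih (seen.set (item - 1).toNat true) (by simp [hlen])]
        constructor
        · rintro ⟨hbd, hnd, hseen⟩
          have hnm : item ∉ rest := by
            intro hmem
            have := hseen item hmem
            rw [pvGetD_set_self seen _ hidx] at this
            simp at this
          refine ⟨?_, List.nodup_cons.mpr ⟨hnm, hnd⟩, ?_⟩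
          · intro x hx
            rcases List.mem_cons.mp hx with rfl | hx
            · exact ⟨h1, h2⟩
            · exact hbd x hx
          · intro x hx
            rcases List.mem_cons.mp hx with rfl | hx
            · exact hs'
            · have hxb := hbd x hx
              have hh := hseen x hx
              by_cases hxi : (x - 1).toNat = (item - 1).toNat
              · have hxe : x = item := by omega
                rw [hxe] at hx
                exact absurd hx hnm
              · rw [pvGetD_set_ne seen _ _ _ (fun h => hxi h.symm)] at hh
                exact hh
        · rintro ⟨hbd, hnd, hseen⟩
          obtain ⟨hnm, hnd'⟩ := List.nodup_cons.mp hnd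
          refine ⟨fun x hx => hbd x (List.mem_cons_of_mem _ hx), hnd', ?_⟩
          intro x hx
          have hxb := hbd x (List.mem_cons_of_mem _ hx)
          have hxi : (item - 1).toNat ≠ (x - 1).toNat := by
            intro h
            have hxe : x = item := by omega
            rw [hxe] at hx
            exact hnm hx
          rw [pvGetD_set_ne seen _ _ _ hxi]
          exact hseen x (List.mem_cons_of_mem _ hx)

lemma pvMarkRow_append (M : Int) (a b : List Int) : ∀ seen,
    pvMarkRow M (a ++ b) seen =
      match pvMarkRow M a seen with
      | none => none
      | some s => pvMarkRow M b s := by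
  induction a with
  | nil => intro seen; simp [pvMarkRow]
  | cons x xs ih =>
    intro seen
    simp only [List.cons_append, pvMarkRow]
    split_ifs with h1 h2
    · rfl
    · rfl
    · exact ih _

lemma pvMarkRows_eq_flatten (M : Int) (m : List (List Int)) : ∀ seen,
    pvMarkRows M m seen = pvMarkRow M m.flatten seen := by
  induction m with
  | nil => intro seen; simp [pvMarkRows, pvMarkRow]
  | cons r rs ih =>
    intro seen
    rw [List.flatten_cons, pvMarkRow_append]
    simp only [pvMarkRows]
    cases pvMarkRow M r seen with
    | none => rfl
    | some s => exact ih s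

-- B = true iff the flattened matrix is a permutation of [1..M]
lemma pvB_iff (m : List (List Int)) :
    has_1_to_n_square_v2_alt m = true ↔ m.flatten.Perm (pvTarget m.flatten.length) := by
  show (pvMarkRows (m.foldl (fun acc row => acc + (row.length : Int)) 0) m
      (List.replicate (m.foldl (fun acc row => acc + (row.length : Int)) 0).toNat false)).isSome
      = true ↔ _
  rw [pvLen_foldl m 0, Int.zero_add, Int.toNat_natCast, pvMarkRows_eq_flatten]
  rw [pvMarkRow_spec m.flatten.length m.flatten (List.replicate m.flatten.length false)
    (List.length_replicate ..)]
  constructor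
  · rintro ⟨hbd, hnd, -⟩
    have hsub : m.flatten ⊆ pvTarget m.flatten.length := by
      intro x hx
      rw [pvTarget_mem]
      exact hbd x hx
    refine List.Subperm.perm_of_length_le (List.subperm_of_subset hnd hsub) ?_
    rw [pvTarget_length]
  · intro h
    refine ⟨?_, ?_, fun x _ => pvGetD_replicate ..⟩
    · intro x hx
      exact (pvTarget_mem m.flatten.length x).mp (h.mem_iff.mp hx)
    · exact h.nodup_iff.mpr (pvTarget_nodup m.flatten.length)

-- ===== VERDICT (by name: the statement is the Claim_ definition above) =====
theorem has_1_to_n_square_v2_spec : Claim_equal_has_1_to_n_square_v2 := by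
  intro m _
  unfold Spec_has_1_to_n_square_v2
  rw [Bool.eq_iff_iff, pvA_iff, pvB_iff]
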